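-- pv_equiv track=rewrite | github.com/geffrydavid/hack_python_2 | hack_5.py | fn_hack_5
-- ===== SOURCE A (Python) =====
-- def fn_hack_5(s):
--     result = ""
--     for i in range(len(s)):
--         # Reemplazar cada tercer carácter con un guión
--         if (i + 1) % 3 == 0:
--             result += '-'
--         else:
--             result += s[i]
--     return result
-- ===== SOURCE B (Python) =====
-- def fn_hack_5(s):
--     # Consume the string in complete groups of three: keep two chars, emit a dash.
--     parts = []
--     while len(s) >= 3:
--         parts.append(s[:2] + '-')
--         s = s[3:]
--     parts.append(s)
--     return ''.join(parts)
-- ===== Notes on version B (the rewrite author's own statement) =====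
-- stated objective: alternative
-- what changed: B consumes the string in complete groups of three with a while loop (keep two chars, append a dash, drop three), collecting pieces and joining once, instead of A's per-index loop with an (i+1)%3 test and character indexing.
import Mathlib
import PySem

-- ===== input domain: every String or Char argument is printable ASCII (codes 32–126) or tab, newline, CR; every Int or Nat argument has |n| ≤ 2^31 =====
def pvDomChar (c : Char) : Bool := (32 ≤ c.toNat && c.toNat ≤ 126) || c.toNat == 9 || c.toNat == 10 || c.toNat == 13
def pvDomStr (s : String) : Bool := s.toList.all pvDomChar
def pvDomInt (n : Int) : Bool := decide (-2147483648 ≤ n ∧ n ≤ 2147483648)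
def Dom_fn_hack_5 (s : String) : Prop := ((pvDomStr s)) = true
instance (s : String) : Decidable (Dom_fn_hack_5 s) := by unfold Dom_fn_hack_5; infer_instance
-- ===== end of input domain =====

-- B replaces A's per-index (i+1)%3 test with recursion on groups of three characters (simpler decomposition; return value only).


-- ===== PORT A =====
-- for i in range(len(s)): result += '-' if (i+1)%3==0 else s[i]
-- (s[i] is always in range here, so the default of pyGetD is never used)
def fn_hack_5 (s : String) : String :=
  String.ofList ((PySem.List.pyRange 0 (PySem.Str.len s) 1).foldl
    (fun result i =>
      if PySem.Int.mod (i + 1) 3 = 0 then result ++ ['-']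
      else result ++ [PySem.List.pyGetD s.toList i 'a']) [])

-- ===== PORT B =====
-- while len(s) >= 3: parts.append(s[:2] + '-'); s = s[3:] ; then parts.append(s); return ''.join(parts)
def fnAltLoop (s : List Char) (parts : List (List Char)) : List (List Char) :=
  if 3 ≤ s.length then
    fnAltLoop (PySem.List.slice s (some 3) none)
      (parts ++ [PySem.List.slice s none (some 2) ++ ['-']])
  else parts ++ [s]
termination_by s.length
decreasing_by
  rw [show (3:Int) = ((3:Nat):Int) from rfl, PySem.List.slice_from_natCast]
  simp [List.length_drop]; omega

def fn_hack_5_alt (s : String) : String :=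
  String.ofList (fnAltLoop s.toList []).flatten

-- ===== PRECONDITION & SPEC =====
def Spec_fn_hack_5 (s : String) (out : String) : Prop := out = fn_hack_5_alt s
instance (s : String) (out : String) : Decidable (Spec_fn_hack_5 s out) := by unfold Spec_fn_hack_5; infer_instance

-- ===== CLAIM (what is proved, stated in full; the proofs are below) =====
def Claim_equal_fn_hack_5 : Prop := ∀ (s : String), Dom_fn_hack_5 s → Spec_fn_hack_5 s (fn_hack_5 s)

-- ===== LEMMAS AND PROOFS =====

-- proof-side helper: the loop's result, written as direct recursion
def fnAltGo (l : List Char) : List Char :=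
  if l.length < 3 then l
  else PySem.List.slice l none (some 2) ++ '-' :: fnAltGo (PySem.List.slice l (some 3) none)
termination_by l.length
decreasing_by
  rw [show (3:Int) = ((3:Nat):Int) from rfl, PySem.List.slice_from_natCast]
  simp [List.length_drop]; omega

-- the accumulator loop flattens to the direct recursion
theorem fnAltLoop_flatten (n : Nat) :
    ∀ (s : List Char) (parts : List (List Char)), s.length ≤ n →
      (fnAltLoop s parts).flatten = parts.flatten ++ fnAltGo s := by
  induction n with
  | zero =>
    intro s parts hn
    have hs : s = [] := List.eq_nil_of_length_eq_zero (Nat.le_zero.mp hn)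
    subst hs
    rw [fnAltLoop, if_neg (by simp), fnAltGo, if_pos (by simp)]
    simp
  | succ n ih =>
    intro s parts hn
    by_cases h : 3 ≤ s.length
    · rw [fnAltLoop, if_pos h, fnAltGo, if_neg (by omega)]
      rw [ih _ _ (by rw [show (3:Int) = ((3:Nat):Int) from rfl, PySem.List.slice_from_natCast]; simp; omega)]
      simp [List.append_assoc]
    · rw [fnAltLoop, if_neg h, fnAltGo, if_pos (by omega)]
      simp

-- a foldl that appends one element per index is a map
theorem foldl_append_singleton {α β : Type} (g : α → β) :
    ∀ (L : List α) (acc : List β),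
      L.foldl (fun r i => r ++ [g i]) acc = acc ++ L.map g := by
  intro L
  induction L with
  | nil => simp
  | cons x xs ih => intro acc; simp [List.foldl_cons, ih, List.append_assoc]

-- A's loop, characterised as a map over List.range
theorem fn_hack_5_eq_map (l : List Char) :
    (PySem.List.pyRange 0 (l.length : Int) 1).foldl
      (fun result i =>
        if PySem.Int.mod (i + 1) 3 = 0 then result ++ ['-']
        else result ++ [PySem.List.pyGetD l i 'a']) []
    = (List.range l.length).map
        (fun k => if (k + 1) % 3 = 0 then '-' else l.getD k 'a') := by
  have hbody :
      (fun (result : List Char) (i : Int) =>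
        if PySem.Int.mod (i + 1) 3 = 0 then result ++ ['-']
        else result ++ [PySem.List.pyGetD l i 'a'])
      = fun result i =>
        result ++ [if PySem.Int.mod (i + 1) 3 = 0 then '-' else PySem.List.pyGetD l i 'a'] := by
    funext r i; split <;> simp_all
  rw [hbody, foldl_append_singleton, PySem.List.pyRange_one, List.map_map]
  simp only [Int.sub_zero, Int.toNat_natCast, List.nil_append]
  apply List.map_congr_left
  intro k hk
  simp only [Function.comp, Int.zero_add]
  have h1 : PySem.Int.mod ((k : Int) + 1) 3 = (((k + 1) % 3 : Nat) : Int) := by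
    rw [PySem.Int.mod, Int.fmod_eq_emod]; simp
  have h2 : PySem.List.pyGetD l (k : Int) 'a' = l.getD k 'a' := by
    simp [PySem.List.pyGetD, List.getD]
  rw [h1, h2]
  by_cases h : (k + 1) % 3 = 0
  · simp [h]
  · rw [if_neg (by exact_mod_cast h), if_neg h]

-- the map form equals B's group-of-three recursion
theorem map_eq_fnAltGo (n : Nat) :
    ∀ (l : List Char), l.length ≤ n →
      (List.range l.length).map
        (fun k => if (k + 1) % 3 = 0 then '-' else l.getD k 'a') = fnAltGo l := by
  induction n with
  | zero =>
    intro l hn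
    have : l = [] := List.eq_nil_of_length_eq_zero (Nat.le_zero.mp hn)
    subst this; simp [fnAltGo]
  | succ n ih =>
    intro l hn
    match l with
    | [] => simp [fnAltGo]
    | [a] => simp [fnAltGo, List.range_succ, List.getD]
    | [a, b] => simp [fnAltGo, List.range_succ, List.getD]
    | a :: b :: c :: rest =>
      rw [fnAltGo, if_neg (by simp)]
      rw [show (3:Int) = ((3:Nat):Int) from rfl, PySem.List.slice_from_natCast]
      simp only [List.drop_succ_cons, List.drop_zero]
      have hlen : (a :: b :: c :: rest).length = 3 + rest.length := by simp; omega
      have hrest : rest.length ≤ n := by simp at hn; omega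
      rw [hlen, List.range_add, List.map_append, List.map_map]
      have hslice : PySem.List.slice (a :: b :: c :: rest) none (some 2) = [a, b] := by
        rw [show (2:Int) = ((2:Nat):Int) from rfl, PySem.List.slice_to_natCast]; rfl
      have hmap3 :
          (List.range 3).map
            (fun k => if (k + 1) % 3 = 0 then '-' else (a :: b :: c :: rest).getD k 'a')
          = [a, b, '-'] := by
        simp [List.range_succ, List.getD]
      have hmap2 :
          (List.range rest.length).map
            ((fun k => if (k + 1) % 3 = 0 then '-' else (a :: b :: c :: rest).getD k 'a')
              ∘ fun x => 3 + x)
          = fnAltGo rest := by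
        rw [← ih rest hrest]
        apply List.map_congr_left
        intro k hk
        simp only [Function.comp]
        have h3 : (3 + k + 1) % 3 = (k + 1) % 3 := by omega
        have h4 : List.getD (a :: b :: c :: rest) (3 + k) 'a' = rest.getD k 'a' := by
          simp [List.getD, Nat.add_comm 3 k]
        rw [h3, h4]
      rw [hslice, hmap3, hmap2]
      rfl

-- ===== VERDICT (by name: the statement is the Claim_ definition above) =====
theorem fn_hack_5_spec : Claim_equal_fn_hack_5 := by
  intro s _
  unfold Spec_fn_hack_5 fn_hack_5 fn_hack_5_alt
  simp only [PySem.Str.len]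
  rw [fn_hack_5_eq_map, map_eq_fnAltGo s.toList.length s.toList (le_refl _),
    fnAltLoop_flatten s.toList.length s.toList [] (le_refl _)]
  simp
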